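-- pv_equiv track=rewrite | github.com/anxovaz/Boletines_programacion_anxo | boletin7.py | ej14
-- ===== SOURCE A (Python) =====
-- def ej14(cadena):
--     cadena=str(cadena)
--     cadena=cadena[::-1] #invirte
--     contador=0
--     cadena_nueva=""
--     for i in cadena:
--         cadena_nueva+=i
--         contador += 1
--         if contador == 3:
--             cadena_nueva+="."
--
--     return cadena_nueva[::-1] #invierte otra vez
-- ===== SOURCE B (Python) =====
-- def ej14(cadena):
--     cadena = str(cadena)
--     if len(cadena) >= 3:
--         return cadena[:-3] + '.' + cadena[-3:]
--     return cadena
-- ===== Notes on version B (the rewrite author's own statement) =====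
-- stated objective: simpler
-- what changed: A's counter is never reset, so its reverse+loop+reverse only ever inserts one dot; B replaces the whole loop with a single closed-form slice expression that splits off the last three characters, guarded by len >= 3.
import Mathlib
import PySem

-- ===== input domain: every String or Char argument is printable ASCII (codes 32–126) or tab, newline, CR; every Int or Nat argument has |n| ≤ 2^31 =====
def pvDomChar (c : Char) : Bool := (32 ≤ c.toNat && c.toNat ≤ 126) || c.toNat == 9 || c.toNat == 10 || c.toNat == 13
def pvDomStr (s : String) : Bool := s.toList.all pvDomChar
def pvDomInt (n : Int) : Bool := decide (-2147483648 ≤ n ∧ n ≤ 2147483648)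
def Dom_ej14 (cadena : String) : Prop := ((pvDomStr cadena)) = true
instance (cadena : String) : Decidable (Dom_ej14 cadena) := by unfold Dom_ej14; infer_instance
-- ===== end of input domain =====

-- B replaces A's reverse+counter loop+reverse (the counter never resets, so only one dot is ever
-- inserted) by the closed-form slice cadena[:-3] + '.' + cadena[-3:] guarded by len >= 3: simpler.

-- ===== PORT A =====
-- one loop step: cadena_nueva += i; contador += 1; if contador == 3: cadena_nueva += "."
def ej14Step (acc : Int × List Char) (i : Char) : Int × List Char :=
  let nueva := acc.2 ++ [i]
  let cont := acc.1 + 1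
  if cont == 3 then (cont, nueva ++ ['.']) else (cont, nueva)

def ej14 (cadena : String) : String :=
  -- cadena = str(cadena) is the identity on a str argument
  let rev := cadena.toList.reverse      -- cadena[::-1] (PySem.Chars.slice? _ none none (-1) = reverse)
  let st := rev.foldl ej14Step (0, [])  -- for i in cadena: …
  String.ofList st.2.reverse            -- cadena_nueva[::-1]

-- ===== PORT B =====
def ej14_alt (cadena : String) : String :=
  let l := cadena.toList
  if 3 ≤ l.length then
    -- cadena[:-3] + '.' + cadena[-3:]
    String.ofList (l.take (l.length - 3) ++ '.' :: l.drop (l.length - 3))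
  else cadena

-- ===== PRECONDITION & SPEC =====
def Spec_ej14 (cadena : String) (out : String) : Prop := out = ej14_alt cadena
instance (cadena : String) (out : String) : Decidable (Spec_ej14 cadena out) := by unfold Spec_ej14; infer_instance

-- ===== CLAIM (what is proved, stated in full; the proofs are below) =====
def Claim_equal_ej14 : Prop := ∀ (cadena : String), Dom_ej14 cadena → Spec_ej14 cadena (ej14 cadena)

-- ===== LEMMAS AND PROOFS =====

-- once the counter has reached 3 the dot branch never fires again: the tail is copied verbatim
theorem ej14_fold_tail (l : List Char) (c : Int) (acc : List Char) (h : 3 ≤ c) :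
    l.foldl ej14Step (c, acc) = (c + l.length, acc ++ l) := by
  induction l generalizing c acc with
  | nil => simp
  | cons a t ih =>
    have h3 : ¬ (c + 1 == 3) = true := by simp; omega
    simp only [List.foldl_cons, ej14Step, h3, if_neg, Bool.false_eq_true, not_false_eq_true]
    rw [ih (c + 1) (acc ++ [a]) (by omega)]
    refine Prod.ext ?_ (by simp)
    simp only [List.length_cons]
    push_cast; ring

theorem ej14_fold_long (a b d : Char) (t : List Char) :
    (a :: b :: d :: t).foldl ej14Step (0, []) = ((3 : Int) + t.length, [a, b, d, '.'] ++ t) := by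
  have h : (a :: b :: d :: t).foldl ej14Step (0, []) = t.foldl ej14Step (3, [a, b, d, '.']) := by
    simp [ej14Step]
  rw [h, ej14_fold_tail t 3 _ (by omega)]

-- the loop's net effect, stated on the reversed character list r = cadena[::-1]
theorem ej14_core (r : List Char) :
    ((r.foldl ej14Step (0, [])).2).reverse =
      if 3 ≤ r.reverse.length then
        r.reverse.take (r.reverse.length - 3) ++ '.' :: r.reverse.drop (r.reverse.length - 3)
      else r.reverse := by
  match r with
  | [] => simp
  | [a] => simp [ej14Step]
  | [a, b] => simp [ej14Step]
  | a :: b :: d :: t =>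
    rw [ej14_fold_long]
    have hlen : (a :: b :: d :: t).reverse.length = t.length + 3 := by simp
    rw [if_pos (by omega)]
    have hl : (a :: b :: d :: t).reverse = t.reverse ++ [d, b, a] := by simp
    rw [hlen, hl]
    simp

-- ej14_core restated on the original list l (r = l.reverse)
theorem ej14_core' (l : List Char) :
    ((l.reverse.foldl ej14Step (0, [])).2).reverse =
      if 3 ≤ l.length then l.take (l.length - 3) ++ '.' :: l.drop (l.length - 3) else l := by
  have h := ej14_core l.reverse
  simpa using h

theorem ej14_eq_alt (cadena : String) : ej14 cadena = ej14_alt cadena := by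
  unfold ej14 ej14_alt
  simp only []
  rw [ej14_core' cadena.toList]
  split_ifs with h
  · rfl
  · exact String.ofList_toList

-- ===== VERDICT (by name: the statement is the Claim_ definition above) =====
theorem ej14_spec : Claim_equal_ej14 := by
  intro cadena _
  unfold Spec_ej14
  exact ej14_eq_alt cadena
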